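-- pv_equiv track=rewrite | github.com/slidracoon72/leetcode | Meta_OA_1.py | solution
-- ===== SOURCE A (Python) =====
-- def solution(matrix, radius):
--     rows, cols = len(matrix), len(matrix[0])
--     max_sum = float('-inf')  # Initialize the maximum sum as the smallest possible number
--
--     for centerX in range(rows):
--         for centerY in range(cols):
--             current_sum = 0  # Sum for the current rhombic area
--
--             for dx in range(-radius, radius + 1):
--                 for dy in range(-radius + abs(dx), radius - abs(dx) + 1):
--                     cellX, cellY = centerX + dx, centerY + dy
--
--                     # Ensure the cell is within bounds
--                     if 0 <= cellX < rows and 0 <= cellY < cols: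
--                         current_sum += matrix[cellX][cellY]
--
--             # Update max_sum if we found a larger sum
--             max_sum = max(max_sum, current_sum)
--
--     return max_sum
-- ===== SOURCE B (Python) =====
-- def solution(matrix, radius):
--     rows, cols = len(matrix), len(matrix[0])
--     # one prefix-sum array per row: prefixes[x][k] = sum of matrix[x][0:k]
--     prefixes = [_prefix(row, cols) for row in matrix]
--
--     def center_sum(cx, cy):
--         s = 0
--         for dx in range(-radius, radius + 1):
--             x = cx + dx
--             if 0 <= x < rows:
--                 w = radius - abs(dx)
--                 lo = max(0, cy - w)
--                 hi = min(cols - 1, cy + w)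
--                 if lo <= hi:
--                     s += prefixes[x][hi + 1] - prefixes[x][lo]
--         return s
--
--     return max(center_sum(cx, cy) for cx in range(rows) for cy in range(cols))
--
--
-- def _prefix(row, cols):
--     p = [0]
--     t = 0
--     for y in range(cols):
--         t += row[y]
--         p.append(t)
--     return p
-- ===== Notes on version B (the rewrite author's own statement) =====
-- stated objective: faster
-- what changed: B precomputes a prefix-sum array per row so each rhombus row is a segment sum read in O(1), making a center O(radius) instead of A's O(radius^2) cell-by-cell scan, and takes max() of a generator of center sums.
-- outside the precondition, e.g. on solution([[1, 2], [3]], -1): A returns 0, B raises IndexError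
import Mathlib
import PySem

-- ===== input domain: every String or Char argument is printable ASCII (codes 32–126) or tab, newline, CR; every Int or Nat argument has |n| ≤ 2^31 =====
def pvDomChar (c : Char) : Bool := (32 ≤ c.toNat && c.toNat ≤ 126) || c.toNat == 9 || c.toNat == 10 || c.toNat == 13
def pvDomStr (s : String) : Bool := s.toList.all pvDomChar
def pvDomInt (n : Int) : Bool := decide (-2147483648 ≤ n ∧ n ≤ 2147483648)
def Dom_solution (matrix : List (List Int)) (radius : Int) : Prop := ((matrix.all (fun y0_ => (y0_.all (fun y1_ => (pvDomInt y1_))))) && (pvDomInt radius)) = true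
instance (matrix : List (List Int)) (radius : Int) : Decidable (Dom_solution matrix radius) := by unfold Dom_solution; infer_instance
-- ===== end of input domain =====

-- B replaces A's O(radius^2)-per-center rhombus scan by per-row prefix sums: each rhombus row is
-- a segment sum read in O(1), so O(radius) per center. Return-value equivalence is proved.

-- ===== PORT A =====
-- literal port of A; Python's float('-inf') accumulator is modelled as `none` (Python returns
-- that float only when there is no center at all, which Pre_ excludes; `.getD 0` is unreachable)
def solution (matrix : List (List Int)) (radius : Int) : Int :=
  let rows : Int := matrix.length
  let cols : Int := (PySem.List.pyGetD matrix 0 []).length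
  ((PySem.List.pyRange 0 rows 1).foldl (fun (maxSum : Option Int) centerX =>
    (PySem.List.pyRange 0 cols 1).foldl (fun maxSum centerY =>
      let cur : Int := (PySem.List.pyRange (-radius) (radius + 1) 1).foldl (fun cur dx =>
        (PySem.List.pyRange (-radius + |dx|) (radius - |dx| + 1) 1).foldl (fun cur dy =>
          let cellX := centerX + dx
          let cellY := centerY + dy
          if 0 ≤ cellX ∧ cellX < rows ∧ 0 ≤ cellY ∧ cellY < cols then
            cur + PySem.List.pyGetD (PySem.List.pyGetD matrix cellX []) cellY 0
          else cur) cur) 0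
      some (match maxSum with | none => cur | some m => max m cur)) maxSum) none).getD 0

-- ===== PORT B =====
-- _prefix(row, cols): p = [0]; t = 0; for y in range(cols): t += row[y]; p.append(t)
def altPrefix (row : List Int) (cols : Int) : List Int :=
  ((PySem.List.pyRange 0 cols 1).foldl (fun (pt : List Int × Int) y =>
    let t := pt.2 + PySem.List.pyGetD row y 0
    (pt.1 ++ [t], t)) ([0], 0)).1

def altCenterSum (prefixes : List (List Int)) (rows cols radius : Int) (cx cy : Int) : Int :=
  (PySem.List.pyRange (-radius) (radius + 1) 1).foldl (fun (s : Int) dx =>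
    let x := cx + dx
    if 0 ≤ x ∧ x < rows then
      let w := radius - |dx|
      let lo := max 0 (cy - w)
      let hi := min (cols - 1) (cy + w)
      if lo ≤ hi then
        s + (PySem.List.pyGetD (PySem.List.pyGetD prefixes x []) (hi + 1) 0
             - PySem.List.pyGetD (PySem.List.pyGetD prefixes x []) lo 0)
      else s
    else s) 0

def solution_alt (matrix : List (List Int)) (radius : Int) : Int :=
  let rows : Int := matrix.length
  let cols : Int := (PySem.List.pyGetD matrix 0 []).length
  let prefixes := matrix.map (fun row => altPrefix row cols)
  ((PySem.List.max? ((PySem.List.pyRange 0 rows 1).flatMap (fun cx =>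
      (PySem.List.pyRange 0 cols 1).map (fun cy =>
        altCenterSum prefixes rows cols radius cx cy))) (fun v => v)).getD 0)

-- ===== PRECONDITION & SPEC =====
-- Pre_ excludes the empty matrix (A raises IndexError), zero-width matrices (A returns the float
-- -inf, not an int) and ragged matrices whose first row is not the shortest: A raises IndexError
-- on those whenever radius ≥ 0, and B's prefix pass raises on them even for radius < 0, where A
-- happens to return 0 without touching any row.
def Pre_solution (matrix : List (List Int)) (radius : Int) : Prop :=
  matrix ≠ [] ∧ 0 < (matrix.headD []).length ∧
    ∀ row ∈ matrix, (matrix.headD []).length ≤ row.length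
instance (matrix : List (List Int)) (radius : Int) : Decidable (Pre_solution matrix radius) := by
  unfold Pre_solution; infer_instance
def pvWitness_solution : List (List Int) × Int := ([[1, -2], [3, 4]], 1)

def Spec_solution (matrix : List (List Int)) (radius : Int) (out : Int) : Prop := out = solution_alt matrix radius
instance (matrix : List (List Int)) (radius : Int) (out : Int) : Decidable (Spec_solution matrix radius out) := by unfold Spec_solution; infer_instance

-- ===== CLAIM (what is proved, stated in full; the proofs are below) =====
def Claim_equal_solution : Prop := ∀ (matrix : List (List Int)) (radius : Int), Dom_solution matrix radius → Pre_solution matrix radius → Spec_solution matrix radius (solution matrix radius)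

-- ===== LEMMAS AND PROOFS =====

-- a guarded fold whose guard never fires leaves the accumulator unchanged
theorem pv_foldl_if_false {α : Type} (l : List α) (P : α → Prop) [DecidablePred P]
    (f : Int → α → Int) (c : Int) (h : ∀ x ∈ l, ¬ P x) :
    l.foldl (fun c x => if P x then f c x else c) c = c := by
  induction l generalizing c with
  | nil => rfl
  | cons a t ih =>
    simp only [List.foldl_cons, if_neg (h a (by simp))]
    exact ih c (fun x hx => h x (by simp [hx]))

theorem pv_take_succ_sum (row : List Int) (k : Nat) :
    (row.take (k + 1)).sum = (row.take k).sum + row.getD k 0 := by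
  rw [List.take_add_one, List.sum_append]
  rcases h : row[k]? with _ | v
  · simp [List.getD, h]
  · simp [List.getD, h]

-- invariant of B's prefix loop
theorem pv_prefix_inv (row : List Int) (n : Nat) :
    (List.range n).foldl (fun (pt : List Int × Int) (k : Nat) =>
      let t := pt.2 + PySem.List.pyGetD row (k : Int) 0
      (pt.1 ++ [t], t)) ([0], 0)
    = ((List.range (n + 1)).map (fun k => (row.take k).sum), (row.take n).sum) := by
  induction n with
  | zero => simp
  | succ n ih =>
    rw [List.range_succ, List.foldl_append, ih]
    simp only [List.foldl_cons, List.foldl_nil, PySem.List.pyGetD_natCast]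
    rw [List.range_succ (n := n + 1), List.map_append]
    simp [pv_take_succ_sum]

theorem pv_altPrefix_eq (row : List Int) (n : Nat) :
    altPrefix row (n : Int) = (List.range (n + 1)).map (fun k => (row.take k).sum) := by
  unfold altPrefix
  rw [PySem.List.pyRange_zero_natCast, List.foldl_map, pv_prefix_inv]

-- reading B's prefix array
theorem pv_prefix_get (row : List Int) (n : Nat) (t : Int) (h0 : 0 ≤ t) (h1 : t ≤ (n : Int)) :
    PySem.List.pyGetD (altPrefix row (n : Int)) t 0 = (row.take t.toNat).sum := by
  rw [pv_altPrefix_eq, PySem.List.pyGetD_of_nonneg _ _ h0,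
    PySem.List.getD_map_range _ _ _ _ (by omega)]

-- clipped segment sums as differences of prefix sums at clamped endpoints
theorem pv_seg (row : List Int) (cols : Int) (n : Nat) :
    ∀ (u cur : Int),
    (List.range n).foldl (fun (c : Int) (k : Nat) =>
        if 0 ≤ u + (k : Int) ∧ u + (k : Int) < cols
        then c + PySem.List.pyGetD row (u + (k : Int)) 0 else c) cur
    = cur + ((row.take (max 0 (min (u + (n : Int)) cols)).toNat).sum
             - (row.take (max 0 (min u cols)).toNat).sum) := by
  induction n with
  | zero => simp
  | succ n ih =>
    intro u cur
    rw [List.range_succ, List.foldl_append, ih]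
    simp only [List.foldl_cons, List.foldl_nil]
    push_cast
    by_cases hc : 0 ≤ u + (n : Int) ∧ u + (n : Int) < cols
    · rw [if_pos hc]
      have h1 : max 0 (min (u + ((n : Int) + 1)) cols) = (u + (n : Int)) + 1 := by omega
      have h2 : max 0 (min (u + (n : Int)) cols) = u + (n : Int) := by omega
      rw [h1, h2, PySem.List.pyGetD_of_nonneg _ _ hc.1,
        show ((u + (n : Int)) + 1).toNat = (u + (n : Int)).toNat + 1 by omega, pv_take_succ_sum]
      ring
    · rw [if_neg hc]
      have h3 : max 0 (min (u + ((n : Int) + 1)) cols) = max 0 (min (u + (n : Int)) cols) := by omega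
      rw [h3]

-- A's inner rhombus-row loop (over dy) equals B's prefix-difference expression, for one row
theorem pv_row_eq (row : List Int) (ncols : Nat) (cy w cur : Int) (hw : 0 ≤ w) :
    (PySem.List.pyRange (-w) (w + 1) 1).foldl (fun (c : Int) dy =>
        if 0 ≤ cy + dy ∧ cy + dy < (ncols : Int)
        then c + PySem.List.pyGetD row (cy + dy) 0 else c) cur
    = (if max 0 (cy - w) ≤ min ((ncols : Int) - 1) (cy + w) then
         cur + (PySem.List.pyGetD (altPrefix row (ncols : Int)) (min ((ncols : Int) - 1) (cy + w) + 1) 0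
                - PySem.List.pyGetD (altPrefix row (ncols : Int)) (max 0 (cy - w)) 0)
       else cur) := by
  rw [PySem.List.pyRange_one, List.foldl_map]
  rw [PySem.List.foldl_congr_mem _ _
      (fun (c : Int) (k : Nat) =>
        if 0 ≤ (cy - w) + (k : Int) ∧ (cy - w) + (k : Int) < (ncols : Int)
        then c + PySem.List.pyGetD row ((cy - w) + (k : Int)) 0 else c) _
      (by intro c k _; rw [show cy + (-w + (k : Int)) = (cy - w) + (k : Int) by ring])]
  rw [pv_seg]
  have hn : ((w + 1 - -w).toNat : Int) = 2 * w + 1 := by omega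
  rw [hn]
  by_cases hif : max 0 (cy - w) ≤ min ((ncols : Int) - 1) (cy + w)
  · rw [if_pos hif]
    have hN : (1 : Int) ≤ (ncols : Int) := by omega
    have e1 : max 0 (min (cy - w + (2 * w + 1)) (ncols : Int)) = min ((ncols : Int) - 1) (cy + w) + 1 := by omega
    have e2 : max 0 (min (cy - w) (ncols : Int)) = max 0 (cy - w) := by omega
    rw [e1, e2, pv_prefix_get _ _ _ (by omega) (by omega), pv_prefix_get _ _ _ (by omega) (by omega)]
  · rw [if_neg hif]
    have e3 : max 0 (min (cy - w + (2 * w + 1)) (ncols : Int)) = max 0 (min (cy - w) (ncols : Int)) := by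
      omega
    rw [e3]; ring

-- running optional max over a fold equals Python's max() of the list
theorem pv_optmax_some (l : List Int) : ∀ (m : Int),
    l.foldl (fun (a : Option Int) c => some (match a with | none => c | some m => max m c)) (some m)
    = some (l.foldl max m) := by
  induction l with
  | nil => intro m; rfl
  | cons x t ih => intro m; simp only [List.foldl_cons]; exact ih (max m x)

theorem pv_optmax (l : List Int) :
    l.foldl (fun (a : Option Int) c => some (match a with | none => c | some m => max m c)) none
    = PySem.List.max? l (fun y => y) := by
  cases l with
  | nil => rfl
  | cons x t =>
    simp only [List.foldl_cons, PySem.List.max?_id_cons]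
    exact pv_optmax_some t x

-- pyGetD through a map at a valid index
theorem pv_pyGetD_map_valid {α β : Type} (f : α → β) (xs : List α) (i : Int) (d : α) (d' : β)
    (h0 : 0 ≤ i) (h1 : i < (xs.length : Int)) :
    PySem.List.pyGetD (xs.map f) i d' = f (PySem.List.pyGetD xs i d) := by
  rw [PySem.List.pyGetD_of_nonneg _ _ h0, PySem.List.pyGetD_of_nonneg _ _ h0,
    List.getD_eq_getElem _ _ (by simp; omega), List.getD_eq_getElem _ _ (by omega)]
  simp

-- the two ports agree on every input (the Python-level differences live outside Pre_)
theorem pv_ports_eq (matrix : List (List Int)) (radius : Int) :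
    solution matrix radius = solution_alt matrix radius := by
  unfold solution solution_alt
  dsimp only
  have hcent : ∀ cx cy : Int,
      (PySem.List.pyRange (-radius) (radius + 1) 1).foldl (fun cur dx =>
        (PySem.List.pyRange (-radius + |dx|) (radius - |dx| + 1) 1).foldl (fun cur dy =>
          if 0 ≤ cx + dx ∧ cx + dx < (matrix.length : Int) ∧
              0 ≤ cy + dy ∧ cy + dy < ((PySem.List.pyGetD matrix 0 []).length : Int) then
            cur + PySem.List.pyGetD (PySem.List.pyGetD matrix (cx + dx) []) (cy + dy) 0
          else cur) cur) 0
      = altCenterSum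
          (matrix.map (fun row => altPrefix row ((PySem.List.pyGetD matrix 0 []).length : Int)))
          (matrix.length : Int) ((PySem.List.pyGetD matrix 0 []).length : Int) radius cx cy := by
    intro cx cy
    unfold altCenterSum
    apply PySem.List.foldl_congr_mem
    intro cur dx hdx
    dsimp only
    obtain ⟨hd1, hd2⟩ := PySem.List.mem_pyRange_one.mp hdx
    have habs : |dx| ≤ radius := abs_le.mpr ⟨hd1, by omega⟩
    have hw : (0 : Int) ≤ radius - |dx| := by linarith
    rw [show -radius + |dx| = -(radius - |dx|) by ring]
    by_cases hx : 0 ≤ cx + dx ∧ cx + dx < (matrix.length : Int)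
    · rw [if_pos hx,
        PySem.List.foldl_congr_mem _ _ (fun (c : Int) dy =>
          if 0 ≤ cy + dy ∧ cy + dy < ((PySem.List.pyGetD matrix 0 []).length : Int) then
            c + PySem.List.pyGetD (PySem.List.pyGetD matrix (cx + dx) []) (cy + dy) 0
          else c) _
          (by
            intro c dy _
            refine if_congr ?_ rfl rfl
            exact ⟨fun h => h.2.2, fun h => ⟨hx.1, hx.2, h⟩⟩),
        pv_row_eq _ _ _ _ _ hw,
        pv_pyGetD_map_valid (fun row => altPrefix row ((PySem.List.pyGetD matrix 0 []).length : Int))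
          matrix (cx + dx) [] [] hx.1 hx.2]
    · rw [if_neg hx,
        pv_foldl_if_false _ (fun dy =>
          0 ≤ cx + dx ∧ cx + dx < (matrix.length : Int) ∧
            0 ≤ cy + dy ∧ cy + dy < ((PySem.List.pyGetD matrix 0 []).length : Int))
          (fun c dy => c + PySem.List.pyGetD (PySem.List.pyGetD matrix (cx + dx) []) (cy + dy) 0)
          cur (fun dy _ hP => hx ⟨hP.1, hP.2.1⟩)]
  congr 1
  simp only [hcent]
  rw [← pv_optmax, List.foldl_flatMap]
  simp only [List.foldl_map]

-- ===== VERDICT (by name: the statement is the Claim_ definition above) =====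
theorem solution_spec : Claim_equal_solution := by
  intro matrix radius _ _
  unfold Spec_solution
  exact pv_ports_eq matrix radius
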